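-- pv_equiv track=rewrite | github.com/Jared-Kodero/ufs_py | py_scripts/fv3gfs_cpu_config.py | _valid_pes
-- ===== SOURCE A (Python) =====
-- def _valid_pes(
--     nx: int,
--     ny: int,
--     ntiles: int = 1,
--     max_div: int | None = None,
-- ) -> list[int]:
--     if max_div is None:
--         max_div = max(nx, ny)
--     valid = set(
--         ntiles * x * y
--         for x in range(1, min(nx, max_div) + 1)
--         if nx % x == 0
--         for y in range(1, min(ny, max_div) + 1)
--         if ny % y == 0
--     )
--     return sorted(valid)
-- ===== SOURCE B (Python) =====
-- def _divisors(n, cap):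
--     cap = min(n, cap)
--     ds = []
--     i = 1
--     while i * i <= n:
--         if n % i == 0:
--             if i <= cap:
--                 ds.append(i)
--             j = n // i
--             if j != i and j <= cap:
--                 ds.append(j)
--         i += 1
--     return ds
--
--
-- def _valid_pes(nx, ny, ntiles=1, max_div=None):
--     if max_div is None:
--         max_div = max(nx, ny)
--     dx = _divisors(nx, max_div)
--     dy = _divisors(ny, max_div)
--     return sorted({ntiles * x * y for x in dx for y in dy})
-- ===== Notes on version B (the rewrite author's own statement) =====
-- stated objective: faster
-- what changed: Instead of scanning every candidate in range(1, min(n,max_div)+1) for nx and ny, B enumerates the divisors of each via trial division up to sqrt(n) (recording i and n//i) and then forms the products over the two small divisor lists.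
import Mathlib
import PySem

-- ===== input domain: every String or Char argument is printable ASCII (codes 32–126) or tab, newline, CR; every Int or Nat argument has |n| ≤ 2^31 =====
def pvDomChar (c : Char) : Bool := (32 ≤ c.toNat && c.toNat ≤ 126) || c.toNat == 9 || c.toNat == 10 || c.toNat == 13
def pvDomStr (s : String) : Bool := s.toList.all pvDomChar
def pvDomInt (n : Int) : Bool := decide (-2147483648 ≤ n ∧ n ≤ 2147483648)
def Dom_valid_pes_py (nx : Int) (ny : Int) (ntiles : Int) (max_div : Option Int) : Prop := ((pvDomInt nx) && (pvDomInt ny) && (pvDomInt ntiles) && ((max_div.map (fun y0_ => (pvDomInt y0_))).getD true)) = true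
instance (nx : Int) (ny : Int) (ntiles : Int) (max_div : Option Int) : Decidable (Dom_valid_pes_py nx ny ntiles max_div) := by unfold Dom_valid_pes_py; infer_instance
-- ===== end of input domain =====

-- termination/bound helper for the while loop (cited by decreasing_by)
lemma pv_le_mul_self (i : Int) : i ≤ i * i := by
  rcases (show i ≤ 0 ∨ 0 < i by omega) with h0 | h0
  · exact le_trans h0 (mul_self_nonneg i)
  · nlinarith

-- B replaces A's full scan of range(1, min(n,max_div)+1) by sqrt-bounded divisor
-- enumeration for nx and ny, then takes products over the two divisor lists (faster in a timing run).

-- ===== PORT A =====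
def valid_pes_py (nx : Int) (ny : Int) (ntiles : Int) (max_div : Option Int) : List Int :=
  let md := max_div.getD (max nx ny)
  let valid : PySem.Set Int := PySem.Set.ofList
    ((PySem.List.pyRange 1 (min nx md + 1) 1).flatMap (fun x =>
      if PySem.Int.mod nx x = 0 then
        (PySem.List.pyRange 1 (min ny md + 1) 1).flatMap (fun y =>
          if PySem.Int.mod ny y = 0 then [ntiles * x * y] else [])
      else []))
  PySem.List.sorted valid (fun z => z) false

-- ===== PORT B =====
-- while loop of _divisors in Source B (i from 1 while i*i <= n)
def pvDivisorsAux (n : Int) (cap : Int) (i : Int) (ds : List Int) : List Int :=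
  if h : i * i ≤ n then
    let ds1 : List Int :=
      if PySem.Int.mod n i = 0 then
        let ds0 := if i ≤ cap then ds ++ [i] else ds
        let j := PySem.Int.floordiv n i
        if j ≠ i ∧ j ≤ cap then ds0 ++ [j] else ds0
      else ds
    pvDivisorsAux n cap (i + 1) ds1
  else ds
termination_by (n + 1 - i).toNat
decreasing_by
  have : i ≤ n := le_trans (pv_le_mul_self i) h
  omega

def pvDivisors (n : Int) (cap : Int) : List Int :=
  pvDivisorsAux n (min n cap) 1 []

def valid_pes_py_alt (nx : Int) (ny : Int) (ntiles : Int) (max_div : Option Int) : List Int :=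
  let md := max_div.getD (max nx ny)
  let dx := pvDivisors nx md
  let dy := pvDivisors ny md
  let prods : PySem.Set Int :=
    PySem.Set.ofList (dx.flatMap (fun x => dy.map (fun y => ntiles * x * y)))
  PySem.List.sorted prods (fun z => z) false

-- ===== PRECONDITION & SPEC =====
def Spec_valid_pes_py (nx : Int) (ny : Int) (ntiles : Int) (max_div : Option Int) (out : List Int) : Prop := out = valid_pes_py_alt nx ny ntiles max_div
instance (nx : Int) (ny : Int) (ntiles : Int) (max_div : Option Int) (out : List Int) : Decidable (Spec_valid_pes_py nx ny ntiles max_div out) := by unfold Spec_valid_pes_py; infer_instance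

-- ===== CLAIM (what is proved, stated in full; the proofs are below) =====
def Claim_equal_valid_pes_py : Prop := ∀ (nx : Int) (ny : Int) (ntiles : Int) (max_div : Option Int), Dom_valid_pes_py nx ny ntiles max_div → Spec_valid_pes_py nx ny ntiles max_div (valid_pes_py nx ny ntiles max_div)

-- ===== LEMMAS AND PROOFS =====

lemma mem_ite_list {c : Prop} [Decidable c] {z : Int} {l : List Int} :
    z ∈ (if c then l else ([] : List Int)) ↔ c ∧ z ∈ l := by
  split_ifs with h <;> simp [h]

-- membership invariant for the while loop, by induction on the remaining fuel
lemma mem_pvDivisorsAux (n cap : Int) :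
    ∀ (m : Nat) (i : Int) (ds : List Int) (z : Int), (n + 1 - i).toNat ≤ m → 1 ≤ i →
      (z ∈ pvDivisorsAux n cap i ds ↔
        z ∈ ds ∨ ∃ k, i ≤ k ∧ k * k ≤ n ∧ n % k = 0 ∧ z ≤ cap ∧
          (z = k ∨ (z = n / k ∧ n / k ≠ k))) := by
  intro m
  induction m with
  | zero =>
    intro i ds z hm hi
    have h : ¬ i * i ≤ n := by
      intro h
      have := le_trans (pv_le_mul_self i) h
      omega
    rw [pvDivisorsAux]
    simp only [h, dif_neg, not_false_iff]
    constructor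
    · exact Or.inl
    · rintro (hz | ⟨k, hk, hkk, -, -, -⟩)
      · exact hz
      · exfalso
        have h1 := pv_le_mul_self i
        have h2 := pv_le_mul_self k
        have hik : i * i ≤ k * k := by nlinarith
        omega
  | succ m ihm =>
    intro i ds z hm hi
    rw [pvDivisorsAux]
    by_cases h : i * i ≤ n
    · simp only [h, dif_pos]
      have hin : i ≤ n := le_trans (pv_le_mul_self i) h
      rw [ihm (i + 1) _ z (by omega) (by omega)]
      have hmod := PySem.Int.mod_eq_emod_of_pos (a := n) (b := i) (by omega)
      have hfd := PySem.Int.floordiv_eq_ediv_of_pos (a := n) (b := i) (by omega)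
      rw [hmod, hfd]
      constructor
      · rintro (hz | ⟨k, hk, hkk, hkm, hzc, hzk⟩)
        · by_cases h0 : n % i = 0
          · rw [if_pos h0] at hz
            by_cases h1 : n / i ≠ i ∧ n / i ≤ cap
            · rw [if_pos h1] at hz
              rcases List.mem_append.mp hz with hz | hz
              · by_cases h2 : i ≤ cap
                · rw [if_pos h2] at hz
                  rcases List.mem_append.mp hz with hz | hz
                  · exact Or.inl hz
                  · have hzi := List.mem_singleton.mp hz
                    exact Or.inr ⟨i, le_refl _, h, h0, by omega, Or.inl hzi⟩
                · rw [if_neg h2] at hz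
                  exact Or.inl hz
              · have hzj := List.mem_singleton.mp hz
                exact Or.inr ⟨i, le_refl _, h, h0, by omega, Or.inr ⟨hzj, h1.1⟩⟩
            · rw [if_neg h1] at hz
              by_cases h2 : i ≤ cap
              · rw [if_pos h2] at hz
                rcases List.mem_append.mp hz with hz | hz
                · exact Or.inl hz
                · have hzi := List.mem_singleton.mp hz
                  exact Or.inr ⟨i, le_refl _, h, h0, by omega, Or.inl hzi⟩
              · rw [if_neg h2] at hz
                exact Or.inl hz
          · rw [if_neg h0] at hz
            exact Or.inl hz
        · exact Or.inr ⟨k, by omega, hkk, hkm, hzc, hzk⟩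
      · rintro (hz | ⟨k, hk, hkk, hkm, hzc, hzk⟩)
        · left
          split_ifs <;> simp [hz]
        · rcases eq_or_lt_of_le hk with hik | hik
          · subst hik
            left
            rw [if_pos hkm]
            rcases hzk with hz | ⟨hz, hne⟩
            · subst hz
              rw [if_pos hzc]
              split_ifs with h1 <;> simp [List.mem_append]
            · subst hz
              rw [if_pos (⟨hne, hzc⟩ : n / i ≠ i ∧ n / i ≤ cap)]
              simp [List.mem_append]
          · exact Or.inr ⟨k, by omega, hkk, hkm, hzc, hzk⟩
    · simp only [h, dif_neg, not_false_iff]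
      constructor
      · exact Or.inl
      · rintro (hz | ⟨k, hk, hkk, -, -, -⟩)
        · exact hz
        · exfalso
          have h1 := pv_le_mul_self i
          have h2 := pv_le_mul_self k
          have hik : i * i ≤ k * k := by nlinarith
          omega

-- the divisor list holds exactly the divisors of n that are ≤ min n cap
lemma mem_pvDivisors (n cap z : Int) :
    z ∈ pvDivisors n cap ↔ 1 ≤ z ∧ z ≤ min n cap ∧ n % z = 0 := by
  unfold pvDivisors
  rw [mem_pvDivisorsAux n (min n cap) ((n + 1 - 1).toNat) 1 [] z le_rfl le_rfl]
  simp only [List.not_mem_nil, false_or]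
  constructor
  · rintro ⟨k, hk1, hkk, hkm, hzc, hzk⟩
    have hkdvd : k ∣ n := Int.dvd_of_emod_eq_zero hkm
    have hmul : k * (n / k) = n := Int.mul_ediv_cancel' hkdvd
    rcases hzk with hz | ⟨hz, _⟩
    · subst hz
      exact ⟨hk1, hzc, hkm⟩
    · subst hz
      have hn1 : 1 ≤ n := by nlinarith
      have hq1 : 1 ≤ n / k := by nlinarith
      have hdvd2 : n / k ∣ n := ⟨k, by linarith [hmul, mul_comm k (n / k)]⟩
      exact ⟨hq1, hzc, Int.emod_eq_zero_of_dvd hdvd2⟩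
  · rintro ⟨hz1, hzc, hzm⟩
    have hzn : z ≤ n := le_trans hzc (min_le_left _ _)
    have hn1 : 1 ≤ n := le_trans hz1 hzn
    have hzdvd : z ∣ n := Int.dvd_of_emod_eq_zero hzm
    have hmul : z * (n / z) = n := Int.mul_ediv_cancel' hzdvd
    set e := n / z with he
    have he1 : 1 ≤ e := by nlinarith
    by_cases hzz : z * z ≤ n
    · exact ⟨z, hz1, hzz, hzm, hzc, Or.inl rfl⟩
    · have hzz : n < z * z := by omega
      have hez : e < z := by nlinarith
      have hee : e * e ≤ n := by nlinarith
      have hedvd : e ∣ n := ⟨z, by linarith [mul_comm z e, hmul]⟩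
      have hne : n / e = z := by
        have : e * z = n := by linarith [mul_comm z e, hmul]
        rw [← this, Int.mul_ediv_cancel_left _ (by omega : e ≠ 0)]
      exact ⟨e, he1, hee, Int.emod_eq_zero_of_dvd hedvd, hzc,
        Or.inr ⟨hne.symm, by omega⟩⟩

-- membership in A's generator list
lemma mem_listA (nx ny ntiles md z : Int) :
    (z ∈ (PySem.List.pyRange 1 (min nx md + 1) 1).flatMap (fun x =>
      if PySem.Int.mod nx x = 0 then
        (PySem.List.pyRange 1 (min ny md + 1) 1).flatMap (fun y =>
          if PySem.Int.mod ny y = 0 then [ntiles * x * y] else [])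
      else [])) ↔
    ∃ x y, 1 ≤ x ∧ x ≤ min nx md ∧ nx % x = 0 ∧
           1 ≤ y ∧ y ≤ min ny md ∧ ny % y = 0 ∧ z = ntiles * x * y := by
  simp only [List.mem_flatMap, PySem.List.mem_pyRange_one, mem_ite_list,
    List.mem_singleton]
  constructor
  · rintro ⟨x, ⟨hx1, hx2⟩, hxm, y, ⟨hy1, hy2⟩, hym, hz⟩
    rw [PySem.Int.mod_eq_emod_of_pos (by omega)] at hxm
    rw [PySem.Int.mod_eq_emod_of_pos (by omega)] at hym
    exact ⟨x, y, hx1, by omega, hxm, hy1, by omega, hym, hz⟩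
  · rintro ⟨x, y, hx1, hx2, hxm, hy1, hy2, hym, hz⟩
    refine ⟨x, ⟨hx1, by omega⟩, ?_, y, ⟨hy1, by omega⟩, ?_, hz⟩
    · rw [PySem.Int.mod_eq_emod_of_pos (by omega)]; exact hxm
    · rw [PySem.Int.mod_eq_emod_of_pos (by omega)]; exact hym

-- membership in B's product list
lemma mem_listB (nx ny ntiles md z : Int) :
    (z ∈ (pvDivisors nx md).flatMap (fun x =>
        (pvDivisors ny md).map (fun y => ntiles * x * y))) ↔
    ∃ x y, 1 ≤ x ∧ x ≤ min nx md ∧ nx % x = 0 ∧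
           1 ≤ y ∧ y ≤ min ny md ∧ ny % y = 0 ∧ z = ntiles * x * y := by
  simp only [List.mem_flatMap, List.mem_map, mem_pvDivisors]
  constructor
  · rintro ⟨x, ⟨hx1, hx2, hxm⟩, y, ⟨hy1, hy2, hym⟩, hz⟩
    exact ⟨x, y, hx1, hx2, hxm, hy1, hy2, hym, hz.symm⟩
  · rintro ⟨x, y, hx1, hx2, hxm, hy1, hy2, hym, hz⟩
    exact ⟨x, ⟨hx1, hx2, hxm⟩, y, ⟨hy1, hy2, hym⟩, hz.symm⟩

-- ===== VERDICT (by name: the statement is the Claim_ definition above) =====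
theorem valid_pes_py_spec : Claim_equal_valid_pes_py := by
  unfold Claim_equal_valid_pes_py
  intro nx ny ntiles max_div _
  unfold Spec_valid_pes_py valid_pes_py valid_pes_py_alt
  set md := max_div.getD (max nx ny) with hmd
  apply PySem.List.sorted_eq_sorted_of_perm
  · exact fun a b h => h
  · rw [List.perm_ext_iff_of_nodup (PySem.Set.nodup_ofList _) (PySem.Set.nodup_ofList _)]
    intro z
    rw [PySem.Set.mem_ofList, PySem.Set.mem_ofList, mem_listA, mem_listB]
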